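-- pv_equiv track=rewrite | github.com/xym-ee/code-back | hw/1480.py | bfs
-- ===== SOURCE A (Python) =====
-- from collections import deque
--
-- directions = [(-1, 0), (1, 0), (0, -1), (0, 1)]
--
-- def bfs(maze, N, max_radiation):
--     """
--     使用 BFS 检查是否存在一条路径，使得经过的格子的辐射值都不超过 max_radiation
--     """
--     # 如果起点或终点的辐射值超过 max_radiation，直接返回 False
--     if maze[0][0] > max_radiation or maze[N-1][N-1] > max_radiation:
--         return False
--
--     # BFS 队列
--     queue = deque([(0, 0)])
--     # 访问标记
--     visited = [[False] * N for _ in range(N)]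
--     visited[0][0] = True
--
--     while queue:
--         x, y = queue.popleft()
--
--         # 如果到达右下角，返回 True
--         if x == N-1 and y == N-1:
--             return True
--
--         # 遍历四个方向
--         for dx, dy in directions:
--             nx, ny = x + dx, y + dy
--             # 判断是否在边界内，并且没有访问过，且辐射值不超过 max_radiation
--             if 0 <= nx < N and 0 <= ny < N and not visited[nx][ny] and maze[nx][ny] <= max_radiation:
--                 visited[nx][ny] = True
--                 queue.append((nx, ny))
--
--     return False
-- ===== SOURCE B (Python) =====
-- def bfs(maze, N, max_radiation):
--     """
--     Gauss-Seidel saturation: repeatedly sweep the grid in row-major order,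
--     marking any admissible cell adjacent to an already-reached cell, until a
--     full sweep adds nothing; then test whether the goal corner was reached.
--     """
--     if maze[0][0] > max_radiation or maze[N-1][N-1] > max_radiation:
--         return False
--     reach = {(0, 0)}
--     changed = True
--     while changed:
--         changed = False
--         for x in range(N):
--             for y in range(N):
--                 if (x, y) not in reach and maze[x][y] <= max_radiation and \
--                         ((x - 1, y) in reach or (x + 1, y) in reach or
--                          (x, y - 1) in reach or (x, y + 1) in reach):
--                     reach.add((x, y))
--                     changed = True
--     return (N - 1, N - 1) in reach
-- ===== Notes on version B (the rewrite author's own statement) =====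
-- stated objective: alternative
-- what changed: Replaces A's queue-and-visited-matrix BFS by a queueless Gauss-Seidel saturation: repeated row-major sweeps over the grid mark any admissible cell adjacent to an already-reached cell until a full sweep adds nothing, then the goal corner's membership is tested.
-- outside the precondition, e.g. on bfs([[0, 9, 9], [9, 9], [9, 0, 0]], 3, 0): A returns False, B raises IndexError
import Mathlib
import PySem

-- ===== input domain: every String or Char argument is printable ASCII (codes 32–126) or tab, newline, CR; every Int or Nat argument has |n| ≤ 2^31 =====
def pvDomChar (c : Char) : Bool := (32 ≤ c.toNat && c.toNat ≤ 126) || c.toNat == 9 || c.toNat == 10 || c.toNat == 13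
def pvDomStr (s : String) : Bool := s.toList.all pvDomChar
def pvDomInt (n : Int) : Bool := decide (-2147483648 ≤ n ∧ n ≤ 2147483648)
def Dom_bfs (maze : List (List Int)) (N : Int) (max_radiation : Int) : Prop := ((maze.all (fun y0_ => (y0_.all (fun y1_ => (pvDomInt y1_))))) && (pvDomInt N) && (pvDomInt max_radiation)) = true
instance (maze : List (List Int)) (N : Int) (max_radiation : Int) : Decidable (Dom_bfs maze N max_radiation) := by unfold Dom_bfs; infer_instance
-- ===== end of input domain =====

-- B replaces A's queue-and-visited BFS by a queueless Gauss-Seidel saturation sweep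
-- (repeat row-major sweeps marking admissible cells adjacent to reached ones until a
-- sweep adds nothing); an alternative decomposition, not claimed faster.

-- ===== PORT A =====
-- shared indexing helpers: pvAt is Python's maze[i][j] with Python's index semantics
-- (negative wraparound, none = IndexError); pvCell is maze[x][y] for Nat coordinates
-- already known in range (exact on the cells the loops visit inside Pre_)
def pvAt (maze : List (List Int)) (i j : Int) : Option Int :=
  (PySem.List.pyGet? maze i).bind fun row => PySem.List.pyGet? row j

def pvCell (maze : List (List Int)) (x y : Nat) : Int := (maze.getD x []).getD y 0

-- one direction of A's inner `for dx, dy in directions` loop: the guard `inb` is the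
-- Python bounds test `0 <= nx < N and 0 <= ny < N` for that direction, then
-- `not visited[nx][ny] and maze[nx][ny] <= max_radiation`; on success the cell is
-- marked visited and appended to the queue.
def pvTry (maze : List (List Int)) (r : Int)
    (st : List (Nat × Nat) × List (Nat × Nat)) (inb : Bool) (c : Nat × Nat) :
    List (Nat × Nat) × List (Nat × Nat) :=
  if inb = true ∧ c ∉ st.2 ∧ pvCell maze c.1 c.2 ≤ r then (st.1 ++ [c], c :: st.2) else st

-- A's `while queue` loop; `vis` is Python's visited matrix kept as the list of marked
-- coordinates; fuel `n*n` bounds the number of pops (proved sufficient below).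
def bfsLoop (maze : List (List Int)) (n : Nat) (r : Int) :
    Nat → List (Nat × Nat) → List (Nat × Nat) → Bool
  | 0, _, _ => false
  | _ + 1, [], _ => false
  | fuel + 1, (x, y) :: qs, vis =>
    if x = n - 1 ∧ y = n - 1 then true
    else
      let st1 := pvTry maze r (qs, vis) (decide (1 ≤ x ∧ x - 1 < n ∧ y < n)) (x - 1, y)
      let st2 := pvTry maze r st1 (decide (x + 1 < n ∧ y < n)) (x + 1, y)
      let st3 := pvTry maze r st2 (decide (x < n ∧ 1 ≤ y ∧ y - 1 < n)) (x, y - 1)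
      let st4 := pvTry maze r st3 (decide (x < n ∧ y + 1 < n)) (x, y + 1)
      bfsLoop maze n r fuel st4.1 st4.2

def bfs (maze : List (List Int)) (N : Int) (max_radiation : Int) : Bool :=
  let n := N.toNat
  if (pvAt maze 0 0).getD 0 > max_radiation ∨ (pvAt maze (N - 1) (N - 1)).getD 0 > max_radiation then
    false
  else bfsLoop maze n max_radiation (n * n) [(0, 0)] [(0, 0)]

-- ===== PORT B =====
-- one cell test of B's double `for x / for y` sweep: mark (x,y) if unreached,
-- admissible, and some neighbour is reached (the `1 ≤ x`/`1 ≤ y` guards replace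
-- Python's implicit "(-1,y) is never in the set" for Nat coordinates)
def sweepCell (maze : List (List Int)) (r : Int) (R : List (Nat × Nat)) (x y : Nat) :
    List (Nat × Nat) :=
  if (x, y) ∉ R ∧ pvCell maze x y ≤ r ∧
      ((1 ≤ x ∧ (x - 1, y) ∈ R) ∨ (x + 1, y) ∈ R ∨ (1 ≤ y ∧ (x, y - 1) ∈ R) ∨ (x, y + 1) ∈ R)
  then (x, y) :: R else R

-- one full row-major sweep of the grid
def sweep (maze : List (List Int)) (n : Nat) (r : Int) (R : List (Nat × Nat)) :
    List (Nat × Nat) :=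
  (List.range n).foldl (fun S x => (List.range n).foldl (fun T y => sweepCell maze r T x y) S) R

-- B's `while changed` loop: `changed` is exactly "the sweep added something",
-- i.e. sweep R ≠ R; fuel n*n+1 bounds the number of sweeps (proved sufficient below)
def sweepLoop (maze : List (List Int)) (n : Nat) (r : Int) :
    Nat → List (Nat × Nat) → List (Nat × Nat)
  | 0, R => R
  | fuel + 1, R =>
    let R' := sweep maze n r R
    if R' = R then R else sweepLoop maze n r fuel R'

def bfs_alt (maze : List (List Int)) (N : Int) (max_radiation : Int) : Bool :=
  let n := N.toNat
  if (pvAt maze 0 0).getD 0 > max_radiation ∨ (pvAt maze (N - 1) (N - 1)).getD 0 > max_radiation then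
    false
  else decide ((n - 1, n - 1) ∈ sweepLoop maze n max_radiation (n * n + 1) [((0 : Nat), (0 : Nat))])

-- ===== PRECONDITION & SPEC =====
-- Pre_ admits every input on which A stops at the corner radiation guard (performing only
-- the reads Python performs, with Python's index semantics) and otherwise requires the
-- natural domain (N ≥ 1, at least N rows each of length ≥ N); excluded are the inputs
-- where A raises IndexError, and ragged grids on which A's BFS happens never to touch a
-- missing cell and returns False by accident of its traversal (B's sweep raises there).
def Pre_bfs (maze : List (List Int)) (N : Int) (max_radiation : Int) : Prop :=
  (pvAt maze 0 0 ≠ none ∧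
    (max_radiation < (pvAt maze 0 0).getD 0 ∨
      (pvAt maze (N - 1) (N - 1) ≠ none ∧ max_radiation < (pvAt maze (N - 1) (N - 1)).getD 0)))
  ∨ (1 ≤ N ∧ N ≤ (maze.length : Int) ∧ ∀ row ∈ maze.take N.toNat, N ≤ (row.length : Int))
instance (maze : List (List Int)) (N : Int) (max_radiation : Int) : Decidable (Pre_bfs maze N max_radiation) := by unfold Pre_bfs; infer_instance

def pvWitness_bfs : List (List Int) × Int × Int := ([[0, 10], [0, 0]], 2, 5)

def Spec_bfs (maze : List (List Int)) (N : Int) (max_radiation : Int) (out : Bool) : Prop := out = bfs_alt maze N max_radiation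
instance (maze : List (List Int)) (N : Int) (max_radiation : Int) (out : Bool) : Decidable (Spec_bfs maze N max_radiation out) := by unfold Spec_bfs; infer_instance

-- ===== CLAIM (what is proved, stated in full; the proofs are below) =====
def Claim_equal_bfs : Prop := ∀ (maze : List (List Int)) (N : Int) (max_radiation : Int), Dom_bfs maze N max_radiation → Pre_bfs maze N max_radiation → Spec_bfs maze N max_radiation (bfs maze N max_radiation)

-- ===== LEMMAS AND PROOFS =====

-- the abstract reachability relation both programs compute
def OkC (maze : List (List Int)) (n : Nat) (r : Int) (c : Nat × Nat) : Prop :=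
  c.1 < n ∧ c.2 < n ∧ pvCell maze c.1 c.2 ≤ r

def AdjC (a b : Nat × Nat) : Prop :=
  (a.1 = b.1 ∧ (a.2 = b.2 + 1 ∨ b.2 = a.2 + 1)) ∨ (a.2 = b.2 ∧ (a.1 = b.1 + 1 ∨ b.1 = a.1 + 1))

def StepC (maze : List (List Int)) (n : Nat) (r : Int) (a b : Nat × Nat) : Prop :=
  OkC maze n r b ∧ AdjC a b

def ReachC (maze : List (List Int)) (n : Nat) (r : Int) (c : Nat × Nat) : Prop :=
  Relation.ReflTransGen (StepC maze n r) (0, 0) c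

lemma nodup_bounded_length {n : Nat} (l : List (Nat × Nat)) (hnd : l.Nodup)
    (hb : ∀ c ∈ l, c.1 < n ∧ c.2 < n) : l.length ≤ n * n := by
  have h1 : l.toFinset ⊆ Finset.range n ×ˢ Finset.range n := by
    intro c hc
    simp only [List.mem_toFinset] at hc
    obtain ⟨h1, h2⟩ := hb c hc
    simp [Finset.mem_product, h1, h2]
  have := Finset.card_le_card h1
  rwa [List.toFinset_card_of_nodup hnd, Finset.card_product, Finset.card_range] at this

lemma reach_mem_of_closed {maze : List (List Int)} {n : Nat} {r : Int}
    {v : List (Nat × Nat)} (hstart : ((0 : Nat), (0 : Nat)) ∈ v)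
    (hcl : ∀ a ∈ v, ∀ d, StepC maze n r a d → d ∈ v) :
    ∀ c, ReachC maze n r c → c ∈ v := by
  intro c h
  induction h with
  | refl => exact hstart
  | tail _ h2 ih => exact hcl _ ih _ h2

-- invariant while processing the four directions of a popped cell c0
structure MidInv (maze : List (List Int)) (n : Nat) (r : Int) (goal c0 : Nat × Nat)
    (q v : List (Nat × Nat)) : Prop where
  reach : ∀ c ∈ v, ReachC maze n r c
  sub : ∀ c ∈ q, c ∈ v
  ndv : v.Nodup
  ndq : q.Nodup
  bv : ∀ c ∈ v, c.1 < n ∧ c.2 < n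
  start : ((0 : Nat), (0 : Nat)) ∈ v
  c0v : c0 ∈ v
  c0q : c0 ∉ q
  goalq : goal ∈ v → goal ∈ q
  closed : ∀ a ∈ v, a ∉ q → a ≠ c0 → ∀ d, StepC maze n r a d → d ∈ v

lemma pvTry_step {maze : List (List Int)} {n : Nat} {r : Int} {goal c0 : Nat × Nat}
    {q v : List (Nat × Nat)} {inb : Bool} {c : Nat × Nat}
    (H : MidInv maze n r goal c0 q v)
    (hb : inb = true → c.1 < n ∧ c.2 < n)
    (hadj : inb = true → AdjC c0 c) :
    MidInv maze n r goal c0 (pvTry maze r (q, v) inb c).1 (pvTry maze r (q, v) inb c).2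
    ∧ (∀ a ∈ v, a ∈ (pvTry maze r (q, v) inb c).2)
    ∧ (inb = true → pvCell maze c.1 c.2 ≤ r → c ∈ (pvTry maze r (q, v) inb c).2)
    ∧ (pvTry maze r (q, v) inb c).1.length + (n * n - (pvTry maze r (q, v) inb c).2.length)
        ≤ q.length + (n * n - v.length) := by
  unfold pvTry
  by_cases h : inb = true ∧ c ∉ v ∧ pvCell maze c.1 c.2 ≤ r
  · obtain ⟨hi, hcv, hcr⟩ := h
    rw [if_pos ⟨hi, hcv, hcr⟩]
    have hne : c0 ≠ c := fun he => hcv (he ▸ H.c0v)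
    have hcq : c ∉ q := fun hq => hcv (H.sub c hq)
    have hreach : ReachC maze n r c :=
      (H.reach c0 H.c0v).tail ⟨⟨(hb hi).1, (hb hi).2, hcr⟩, hadj hi⟩
    have hnd' : (c :: v).Nodup := List.nodup_cons.2 ⟨hcv, H.ndv⟩
    have hbv' : ∀ a ∈ c :: v, a.1 < n ∧ a.2 < n := by
      intro a ha
      rcases List.mem_cons.1 ha with h | h
      · exact h ▸ hb hi
      · exact H.bv a h
    have hlen : (c :: v).length ≤ n * n := nodup_bounded_length _ hnd' hbv' 
    refine ⟨⟨?_, ?_, hnd', ?_, hbv', List.mem_cons_of_mem _ H.start,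
        List.mem_cons_of_mem _ H.c0v, ?_, ?_, ?_⟩, ?_, ?_, ?_⟩
    · intro a ha
      rcases List.mem_cons.1 ha with h | h
      · exact h ▸ hreach
      · exact H.reach a h
    · intro a ha
      rcases List.mem_append.1 ha with h | h
      · exact List.mem_cons_of_mem _ (H.sub a h)
      · simp at h; simp [h]
    · refine List.Nodup.append H.ndq (List.nodup_singleton c) ?_
      intro a ha hb'
      simp only [List.mem_singleton] at hb'
      exact hcq (hb' ▸ ha)
    · simp only [List.mem_append, List.mem_singleton]
      rintro (hq | hq)
      · exact H.c0q hq
      · exact hne hq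
    · intro hgv
      rcases List.mem_cons.1 hgv with h | h
      · exact List.mem_append_right _ (by simp [h])
      · exact List.mem_append_left _ (H.goalq h)
    · intro a ha haq hac0 d hd
      rcases List.mem_cons.1 ha with h | h
      · exact absurd (List.mem_append_right _ (by simp [h])) haq
      · exact List.mem_cons_of_mem _
          (H.closed a h (fun hq => haq (List.mem_append_left _ hq)) hac0 d hd)
    · intro a ha; exact List.mem_cons_of_mem _ ha
    · intro _ _; exact List.mem_cons_self
    · simp only [List.length_cons] at hlen
      simp only [List.length_append, List.length_cons, List.length_nil]
      omega
  · rw [if_neg h]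
    push_neg at h
    refine ⟨H, fun a ha => ha, ?_, le_refl _⟩
    intro hi hr
    by_contra hcv
    exact (h hi hcv).not_ge hr

lemma closed_of_empty {maze : List (List Int)} {n : Nat} {r : Int}
    {vis : List (Nat × Nat)}
    (hstart : ((0 : Nat), (0 : Nat)) ∈ vis)
    (hgoalq : (n - 1, n - 1) ∈ vis → (n - 1, n - 1) ∈ ([] : List (Nat × Nat)))
    (hclosed : ∀ a ∈ vis, a ∉ ([] : List (Nat × Nat)) → ∀ d, StepC maze n r a d → d ∈ vis) :
    ¬ ReachC maze n r (n - 1, n - 1) := by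
  intro hR
  have hmem := reach_mem_of_closed hstart
    (fun a ha d hd => hclosed a ha (by simp) d hd) _ hR
  simpa using hgoalq hmem

lemma bfsLoop_iff (maze : List (List Int)) (n : Nat) (r : Int) :
    ∀ fuel q vis,
      (∀ c ∈ vis, ReachC maze n r c) →
      (∀ c ∈ q, c ∈ vis) →
      vis.Nodup → q.Nodup →
      (∀ c ∈ vis, c.1 < n ∧ c.2 < n) →
      ((0 : Nat), (0 : Nat)) ∈ vis →
      ((n - 1, n - 1) ∈ vis → (n - 1, n - 1) ∈ q) →
      (∀ a ∈ vis, a ∉ q → ∀ d, StepC maze n r a d → d ∈ vis) →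
      q.length + (n * n - vis.length) ≤ fuel →
      (bfsLoop maze n r fuel q vis = true ↔ ReachC maze n r (n - 1, n - 1)) := by
  intro fuel
  induction fuel with
  | zero =>
    intro q vis hreach hsub hndv hndq hbv hstart hgoalq hclosed hm
    have hq : q = [] := List.eq_nil_of_length_eq_zero (by omega)
    subst hq
    simp only [bfsLoop, Bool.false_eq_true, false_iff]
    exact closed_of_empty hstart hgoalq hclosed
  | succ fuel ih =>
    intro q vis hreach hsub hndv hndq hbv hstart hgoalq hclosed hm
    match q, hsub, hndq, hgoalq, hclosed, hm with
    | [], hsub, hndq, hgoalq, hclosed, hm =>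
      simp only [bfsLoop, Bool.false_eq_true, false_iff]
      exact closed_of_empty hstart hgoalq hclosed
    | (x, y) :: qs, hsub, hndq, hgoalq, hclosed, hm =>
      by_cases hg : x = n - 1 ∧ y = n - 1
      · simp only [bfsLoop, if_pos hg, true_iff]
        have hx := hreach (x, y) (hsub _ List.mem_cons_self)
        rw [hg.1, hg.2] at hx
        exact hx
      · have hxy : (x, y) ∈ vis := hsub _ List.mem_cons_self
        have hxyqs : (x, y) ∉ qs := (List.nodup_cons.1 hndq).1
        have Hm : MidInv maze n r (n - 1, n - 1) (x, y) qs vis :=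
          { reach := hreach
            sub := fun c hc => hsub c (List.mem_cons_of_mem _ hc)
            ndv := hndv
            ndq := (List.nodup_cons.1 hndq).2
            bv := hbv
            start := hstart
            c0v := hxy
            c0q := hxyqs
            goalq := fun hv => by
              rcases List.mem_cons.1 (hgoalq hv) with h | h
              · exact absurd ⟨congrArg Prod.fst h.symm, congrArg Prod.snd h.symm⟩ hg
              · exact h
            closed := fun a ha haq hac0 d hd =>
              hclosed a ha (by
                intro hmem
                rcases List.mem_cons.1 hmem with h | h
                · exact hac0 h
                · exact haq h) d hd }
        have hb1 : decide (1 ≤ x ∧ x - 1 < n ∧ y < n) = true →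
            (x - 1, y).1 < n ∧ (x - 1, y).2 < n := by
          intro hd; have := of_decide_eq_true hd; exact ⟨this.2.1, this.2.2⟩
        have ha1 : decide (1 ≤ x ∧ x - 1 < n ∧ y < n) = true → AdjC (x, y) (x - 1, y) := by
          intro hd; have := of_decide_eq_true hd
          exact Or.inr ⟨rfl, Or.inl (by omega)⟩
        obtain ⟨H1, M1, E1, L1⟩ := pvTry_step (c := (x - 1, y)) Hm hb1 ha1
        have hb2 : decide (x + 1 < n ∧ y < n) = true →
            (x + 1, y).1 < n ∧ (x + 1, y).2 < n := by
          intro hd; have := of_decide_eq_true hd; exact ⟨this.1, this.2⟩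
        have ha2 : decide (x + 1 < n ∧ y < n) = true → AdjC (x, y) (x + 1, y) := by
          intro _; exact Or.inr ⟨rfl, Or.inr rfl⟩
        obtain ⟨H2, M2, E2, L2⟩ := pvTry_step (c := (x + 1, y)) H1 hb2 ha2
        have hb3 : decide (x < n ∧ 1 ≤ y ∧ y - 1 < n) = true →
            (x, y - 1).1 < n ∧ (x, y - 1).2 < n := by
          intro hd; have := of_decide_eq_true hd; exact ⟨this.1, this.2.2⟩
        have ha3 : decide (x < n ∧ 1 ≤ y ∧ y - 1 < n) = true → AdjC (x, y) (x, y - 1) := by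
          intro hd; have := of_decide_eq_true hd
          exact Or.inl ⟨rfl, Or.inl (by omega)⟩
        obtain ⟨H3, M3, E3, L3⟩ := pvTry_step (c := (x, y - 1)) H2 hb3 ha3
        have hb4 : decide (x < n ∧ y + 1 < n) = true →
            (x, y + 1).1 < n ∧ (x, y + 1).2 < n := by
          intro hd; have := of_decide_eq_true hd; exact ⟨this.1, this.2⟩
        have ha4 : decide (x < n ∧ y + 1 < n) = true → AdjC (x, y) (x, y + 1) := by
          intro _; exact Or.inl ⟨rfl, Or.inr rfl⟩
        obtain ⟨H4, M4, E4, L4⟩ := pvTry_step (c := (x, y + 1)) H3 hb4 ha4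
        -- name the four intermediate states
        simp only [bfsLoop, if_neg hg]
        -- closure of the new state, including the popped cell (x, y)
        have hclosed4 : ∀ a ∈ (pvTry maze r (pvTry maze r (pvTry maze r (pvTry maze r (qs, vis)
              (decide (1 ≤ x ∧ x - 1 < n ∧ y < n)) (x - 1, y))
              (decide (x + 1 < n ∧ y < n)) (x + 1, y))
              (decide (x < n ∧ 1 ≤ y ∧ y - 1 < n)) (x, y - 1))
              (decide (x < n ∧ y + 1 < n)) (x, y + 1)).2,
            a ∉ (pvTry maze r (pvTry maze r (pvTry maze r (pvTry maze r (qs, vis)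
              (decide (1 ≤ x ∧ x - 1 < n ∧ y < n)) (x - 1, y))
              (decide (x + 1 < n ∧ y < n)) (x + 1, y))
              (decide (x < n ∧ 1 ≤ y ∧ y - 1 < n)) (x, y - 1))
              (decide (x < n ∧ y + 1 < n)) (x, y + 1)).1 →
            ∀ d, StepC maze n r a d → d ∈ (pvTry maze r (pvTry maze r (pvTry maze r (pvTry maze r (qs, vis)
              (decide (1 ≤ x ∧ x - 1 < n ∧ y < n)) (x - 1, y))
              (decide (x + 1 < n ∧ y < n)) (x + 1, y))
              (decide (x < n ∧ 1 ≤ y ∧ y - 1 < n)) (x, y - 1))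
              (decide (x < n ∧ y + 1 < n)) (x, y + 1)).2 := by
          intro a ha haq d hd
          by_cases hac0 : a = (x, y)
          · subst hac0
            obtain ⟨⟨hd1, hd2, hdr⟩, hadj⟩ := hd
            obtain ⟨d1, d2⟩ := d
            simp only at hd1 hd2
            have hxn : x < n := (hbv _ hxy).1
            have hyn : y < n := (hbv _ hxy).2
            rcases hadj with ⟨h1, h2 | h2⟩ | ⟨h1, h2 | h2⟩
            · -- d = (x, y - 1)
              have he : (x, y - 1) = (d1, d2) := by rw [Prod.mk.injEq]; omega
              refine M4 _ ?_
              rw [← he] at hdr ⊢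
              exact E3 (decide_eq_true (by omega)) hdr
            · -- d = (x, y + 1)
              have he : (x, y + 1) = (d1, d2) := by rw [Prod.mk.injEq]; omega
              rw [← he] at hdr ⊢
              exact E4 (decide_eq_true (by omega)) hdr
            · -- d = (x - 1, y)
              have he : (x - 1, y) = (d1, d2) := by rw [Prod.mk.injEq]; omega
              refine M4 _ (M3 _ (M2 _ ?_))
              rw [← he] at hdr ⊢
              exact E1 (decide_eq_true (by omega)) hdr
            · -- d = (x + 1, y)
              have he : (x + 1, y) = (d1, d2) := by rw [Prod.mk.injEq]; omega
              refine M4 _ (M3 _ ?_)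
              rw [← he] at hdr ⊢
              exact E2 (decide_eq_true (by omega)) hdr
          · exact H4.closed a ha haq hac0 d hd
        refine ih _ _ H4.reach H4.sub H4.ndv H4.ndq H4.bv H4.start H4.goalq hclosed4 ?_
        have hm' : (qs.length + 1) + (n * n - vis.length) ≤ fuel + 1 := by
          simpa [List.length_cons] using hm
        simp only [Prod.mk.eta] at L1 L2 L3 L4
        omega

-- ===== B-side lemmas =====

lemma foldl_pres_mem {α β : Type} (P : α → Prop) (f : α → β → α) :
    ∀ l : List β, (∀ s b, b ∈ l → P s → P (f s b)) → ∀ s, P s → P (l.foldl f s) := by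
  intro l
  induction l with
  | nil => intro _ s hs; simpa using hs
  | cons b t ih =>
    intro h s hs
    exact ih (fun s c hc hp => h s c (List.mem_cons_of_mem _ hc) hp) _
      (h s b List.mem_cons_self hs)

lemma suffix_foldl {γ β : Type} (f : List γ → β → List γ)
    (h : ∀ s b, s <:+ f s b) : ∀ (l : List β) s, s <:+ l.foldl f s := by
  intro l
  induction l with
  | nil => intro s; exact List.suffix_refl s
  | cons b t ih => intro s; exact (h s b).trans (ih (f s b))

lemma foldl_fix {γ β : Type} (f : List γ → β → List γ)
    (h : ∀ s b, s <:+ f s b) :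
    ∀ (l : List β) s, l.foldl f s = s → ∀ b ∈ l, f s b = s := by
  intro l
  induction l with
  | nil => simp
  | cons b t ih =>
    intro s hs c hc
    rw [List.foldl_cons] at hs
    have h2 : f s b <:+ s := by have h2' := suffix_foldl f h t (f s b); rwa [hs] at h2'
    have heq : f s b = s :=
      List.IsSuffix.eq_of_length h2 (Nat.le_antisymm h2.length_le (h s b).length_le)
    rcases List.mem_cons.1 hc with hcb | hct
    · exact hcb ▸ heq
    · exact ih s (by rw [← heq] at hs ⊢; simpa [heq] using hs) c hct

-- the invariant carried through B's sweeps
def PB (maze : List (List Int)) (n : Nat) (r : Int) (R : List (Nat × Nat)) : Prop :=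
  (∀ c ∈ R, ReachC maze n r c) ∧ R.Nodup ∧ ∀ c ∈ R, c.1 < n ∧ c.2 < n

lemma sweepCell_pres {maze : List (List Int)} {n : Nat} {r : Int} {R : List (Nat × Nat)}
    {x y : Nat} (hx : x < n) (hy : y < n) (h : PB maze n r R) :
    PB maze n r (sweepCell maze r R x y) := by
  obtain ⟨hre, hnd, hbd⟩ := h
  unfold sweepCell
  split_ifs with hc
  · obtain ⟨hnR, hcr, hnb⟩ := hc
    have hnew : ReachC maze n r (x, y) := by
      rcases hnb with ⟨hx1, hm⟩ | hm | ⟨hy1, hm⟩ | hm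
      · exact (hre _ hm).tail ⟨⟨hx, hy, hcr⟩, Or.inr ⟨rfl, Or.inr (by omega)⟩⟩
      · exact (hre _ hm).tail ⟨⟨hx, hy, hcr⟩, Or.inr ⟨rfl, Or.inl rfl⟩⟩
      · exact (hre _ hm).tail ⟨⟨hx, hy, hcr⟩, Or.inl ⟨rfl, Or.inr (by omega)⟩⟩
      · exact (hre _ hm).tail ⟨⟨hx, hy, hcr⟩, Or.inl ⟨rfl, Or.inl rfl⟩⟩
    refine ⟨?_, List.nodup_cons.2 ⟨hnR, hnd⟩, ?_⟩
    · intro c hc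
      rcases List.mem_cons.1 hc with h | h
      · exact h ▸ hnew
      · exact hre c h
    · intro c hc
      rcases List.mem_cons.1 hc with h | h
      · exact h ▸ ⟨hx, hy⟩
      · exact hbd c h
  · exact ⟨hre, hnd, hbd⟩

lemma sweep_pres {maze : List (List Int)} {n : Nat} {r : Int} {R : List (Nat × Nat)}
    (h : PB maze n r R) : PB maze n r (sweep maze n r R) := by
  unfold sweep
  refine foldl_pres_mem (PB maze n r) _ _ ?_ _ h
  intro S x hxm hS
  refine foldl_pres_mem (PB maze n r) _ _ ?_ _ hS
  intro T y hym hT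
  exact sweepCell_pres (List.mem_range.1 hxm) (List.mem_range.1 hym) hT

lemma sweepCell_suffix {maze : List (List Int)} {r : Int} {R : List (Nat × Nat)}
    {x y : Nat} : R <:+ sweepCell maze r R x y := by
  unfold sweepCell
  split_ifs
  · exact List.suffix_cons _ _
  · exact List.suffix_refl R

lemma sweep_suffix {maze : List (List Int)} {n : Nat} {r : Int} {R : List (Nat × Nat)} :
    R <:+ sweep maze n r R := by
  unfold sweep
  exact suffix_foldl _ (fun s b => suffix_foldl _ (fun s b => sweepCell_suffix) _ s) _ R

lemma sweep_fix_pointwise {maze : List (List Int)} {n : Nat} {r : Int} {R : List (Nat × Nat)}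
    (hfix : sweep maze n r R = R) :
    ∀ x, x < n → ∀ y, y < n → sweepCell maze r R x y = R := by
  intro x hx y hy
  have houter := foldl_fix _ (fun s b => suffix_foldl _ (fun s b => sweepCell_suffix) _ s)
    (List.range n) R hfix x (List.mem_range.2 hx)
  exact foldl_fix _ (fun s b => sweepCell_suffix) (List.range n) R houter y (List.mem_range.2 hy)

lemma fix_closed {maze : List (List Int)} {n : Nat} {r : Int} {R : List (Nat × Nat)}
    (hfix : ∀ x, x < n → ∀ y, y < n → sweepCell maze r R x y = R) :
    ∀ a ∈ R, ∀ d, StepC maze n r a d → d ∈ R := by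
  intro a ha d hd
  obtain ⟨⟨hd1, hd2, hdr⟩, hadj⟩ := hd
  obtain ⟨d1, d2⟩ := d
  obtain ⟨a1, a2⟩ := a
  simp only at hd1 hd2 hdr
  by_contra hdR
  have hnb : (1 ≤ d1 ∧ (d1 - 1, d2) ∈ R) ∨ (d1 + 1, d2) ∈ R ∨
      (1 ≤ d2 ∧ (d2 - 1) = (d2 - 1) ∧ (d1, d2 - 1) ∈ R) ∨ (d1, d2 + 1) ∈ R := by
    rcases hadj with ⟨h1, h2 | h2⟩ | ⟨h1, h2 | h2⟩
    · exact Or.inr (Or.inr (Or.inr (by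
        have he : (d1, d2 + 1) = (a1, a2) := by rw [Prod.mk.injEq]; omega
        exact he ▸ ha)))
    · refine Or.inr (Or.inr (Or.inl ⟨by omega, rfl, ?_⟩))
      have he : (d1, d2 - 1) = (a1, a2) := by rw [Prod.mk.injEq]; omega
      exact he ▸ ha
    · exact Or.inr (Or.inl (by
        have he : (d1 + 1, d2) = (a1, a2) := by rw [Prod.mk.injEq]; omega
        exact he ▸ ha))
    · refine Or.inl ⟨by omega, ?_⟩
      have he : (d1 - 1, d2) = (a1, a2) := by rw [Prod.mk.injEq]; omega
      exact he ▸ ha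
  have hcell := hfix d1 hd1 d2 hd2
  unfold sweepCell at hcell
  rw [if_pos ⟨hdR, hdr, by
    rcases hnb with h | h | ⟨h1, _, h3⟩ | h
    · exact Or.inl h
    · exact Or.inr (Or.inl h)
    · exact Or.inr (Or.inr (Or.inl ⟨h1, h3⟩))
    · exact Or.inr (Or.inr (Or.inr h))⟩] at hcell
  have := congrArg List.length hcell
  simp at this

lemma sweepLoop_fix {maze : List (List Int)} {n : Nat} {r : Int} :
    ∀ (fuel : Nat) (R : List (Nat × Nat)), PB maze n r R →
      n * n + 1 ≤ R.length + fuel →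
      sweep maze n r (sweepLoop maze n r fuel R) = sweepLoop maze n r fuel R := by
  intro fuel
  induction fuel with
  | zero =>
    intro R hP hlen
    have := nodup_bounded_length R hP.2.1 hP.2.2
    omega
  | succ fuel ih =>
    intro R hP hlen
    by_cases h : sweep maze n r R = R
    · simp [sweepLoop, h]
    · rw [show sweepLoop maze n r (fuel + 1) R = sweepLoop maze n r fuel (sweep maze n r R) by
        simp [sweepLoop, h]]
      refine ih _ (sweep_pres hP) ?_
      have hsuf : R <:+ sweep maze n r R := sweep_suffix
      have hlt : R.length < (sweep maze n r R).length := by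
        rcases Nat.lt_or_ge R.length (sweep maze n r R).length with hl | hl
        · exact hl
        · exact absurd (List.IsSuffix.eq_of_length hsuf
            (Nat.le_antisymm hsuf.length_le hl)).symm h
      omega

lemma sweepLoop_suffix {maze : List (List Int)} {n : Nat} {r : Int} :
    ∀ (fuel : Nat) (R : List (Nat × Nat)), R <:+ sweepLoop maze n r fuel R := by
  intro fuel
  induction fuel with
  | zero => intro R; exact List.suffix_refl R
  | succ fuel ih =>
    intro R
    simp only [sweepLoop]
    split_ifs with h
    · exact List.suffix_refl R
    · exact List.IsSuffix.trans sweep_suffix (ih (sweep maze n r R))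

lemma sweepLoop_pres {maze : List (List Int)} {n : Nat} {r : Int} :
    ∀ (fuel : Nat) (R : List (Nat × Nat)), PB maze n r R →
      PB maze n r (sweepLoop maze n r fuel R) := by
  intro fuel
  induction fuel with
  | zero => intro R h; exact h
  | succ fuel ih =>
    intro R h
    simp only [sweepLoop]
    split_ifs with hc
    · exact h
    · exact ih _ (sweep_pres h)

lemma alt_loop_iff (maze : List (List Int)) (n : Nat) (r : Int) (hn : 1 ≤ n) :
    ((n - 1, n - 1) ∈ sweepLoop maze n r (n * n + 1) [((0 : Nat), (0 : Nat))] ↔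
      ReachC maze n r (n - 1, n - 1)) := by
  have hP0 : PB maze n r [((0 : Nat), (0 : Nat))] := by
    refine ⟨?_, List.nodup_singleton _, ?_⟩
    · intro c hc
      rw [List.mem_singleton.1 hc]
      exact Relation.ReflTransGen.refl
    · intro c hc
      rw [List.mem_singleton.1 hc]
      exact ⟨hn, hn⟩
  have hPf := sweepLoop_pres (n * n + 1) _ hP0
  constructor
  · intro hm
    exact hPf.1 _ hm
  · intro hR
    have hfix := sweepLoop_fix (n * n + 1) _ hP0 (by simp)
    refine reach_mem_of_closed ?_ (fix_closed (sweep_fix_pointwise hfix)) _ hR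
    exact (sweepLoop_suffix (n * n + 1) _).subset List.mem_cons_self

-- ===== assembling the verdict =====

theorem bfs_spec : Claim_equal_bfs := by
  intro maze N r _ hpre
  unfold Spec_bfs bfs bfs_alt
  by_cases hg : (pvAt maze 0 0).getD 0 > r ∨ (pvAt maze (N - 1) (N - 1)).getD 0 > r
  · rw [if_pos hg, if_pos hg]
  · rw [if_neg hg, if_neg hg]
    have hsq : 1 ≤ N := by
      rcases hpre with ⟨_, hv⟩ | hsq
      · exfalso
        push_neg at hg
        rcases hv with h | ⟨_, h⟩
        · exact absurd h (not_lt.2 hg.1)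
        · exact absurd h (not_lt.2 hg.2)
      · exact hsq.1
    have hn : 1 ≤ N.toNat := by omega
    have hnn : 1 ≤ N.toNat * N.toNat := Nat.le_trans hn (Nat.le_mul_of_pos_left _ (by omega))
    have hA : (bfsLoop maze N.toNat r (N.toNat * N.toNat) [(0, 0)] [(0, 0)] = true) ↔
        ReachC maze N.toNat r (N.toNat - 1, N.toNat - 1) := by
      refine bfsLoop_iff maze N.toNat r (N.toNat * N.toNat) [(0, 0)] [(0, 0)]
        ?_ (fun c hc => hc) (List.nodup_singleton _) (List.nodup_singleton _)
        ?_ List.mem_cons_self (fun h => h) ?_ ?_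
      · intro c hc
        rw [List.mem_singleton.1 hc]
        exact Relation.ReflTransGen.refl
      · intro c hc
        rw [List.mem_singleton.1 hc]
        exact ⟨hn, hn⟩
      · intro a ha haq
        exact absurd ha haq
      · simp only [List.length_cons, List.length_nil]
        omega
    have hB := alt_loop_iff maze N.toNat r hn
    cases hbl : bfsLoop maze N.toNat r (N.toNat * N.toNat) [(0, 0)] [(0, 0)] with
    | true => exact (decide_eq_true (hB.mpr (hA.mp hbl))).symm
    | false =>
      refine (decide_eq_false ?_).symm
      intro hm
      rw [hA.mpr (hB.mp hm)] at hbl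
      cases hbl
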